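-- pv_equiv track=rewrite | github.com/imb4dm4n/LeetCode | python/contest.py | evenOddBit
-- ===== SOURCE A (Python) =====
-- from typing import List
--
-- def evenOddBit(n: int) -> List[int]:
--     index   =   0
--     c_odd,c_eve =   0,0
--     while n:
--         if n & 1:
--             if not index&1:
--                 c_eve   +=  1
--             else:
--                 c_odd   +=  1
--         n//=2
--         index   +=  1
--     return [c_eve, c_odd]
-- ===== SOURCE B (Python) =====
-- from typing import List
--
-- def evenOddBit(n: int) -> List[int]:
--     s = bin(n)[2:][::-1]
--     return [s[0::2].count('1'), s[1::2].count('1')]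
-- ===== Notes on version B (the rewrite author's own statement) =====
-- stated objective: idiomatic
-- what changed: Replaces the per-bit while loop with an index-parity test and two running counters by building the reversed binary string and counting '1's in the two step-2 slices.
-- outside the precondition, e.g. on evenOddBit(-1): A does not finish within the time limit, B returns [1, 0]
import Mathlib
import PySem

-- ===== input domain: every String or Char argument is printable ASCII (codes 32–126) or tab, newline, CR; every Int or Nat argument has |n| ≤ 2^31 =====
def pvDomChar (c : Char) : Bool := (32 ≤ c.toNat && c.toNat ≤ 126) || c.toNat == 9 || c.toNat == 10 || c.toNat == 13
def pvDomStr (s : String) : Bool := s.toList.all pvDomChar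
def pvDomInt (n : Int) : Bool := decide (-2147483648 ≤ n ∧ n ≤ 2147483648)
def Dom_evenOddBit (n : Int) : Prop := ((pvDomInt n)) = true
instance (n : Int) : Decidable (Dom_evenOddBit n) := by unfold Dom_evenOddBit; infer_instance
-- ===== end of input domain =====

-- B counts set bits at even/odd positions via the reversed binary string and two step-2
-- slices instead of A's per-bit loop with an index-parity test (objective: idiomatic).
-- A never returns for negative n (the while loop does not terminate), so Pre_ requires 0 ≤ n.

-- ===== PORT A =====
-- The while loop of A, on the (nonnegative, by Pre_) value of n; n //= 2 on a
-- nonnegative int is Nat division.  Transliterated step for step.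
def pvLoopA (m : Nat) (index c_eve c_odd : Int) : List Int :=
  if h : m = 0 then [c_eve, c_odd]
  else
    let p : Int × Int :=
      if m % 2 = 1 then
        if index % 2 = 0 then (c_eve + 1, c_odd) else (c_eve, c_odd + 1)
      else (c_eve, c_odd)
    pvLoopA (m / 2) (index + 1) p.1 p.2
termination_by m
decreasing_by exact Nat.div_lt_self (Nat.pos_of_ne_zero h) (by omega)

def evenOddBit (n : Int) : List Int := pvLoopA n.toNat 0 0 0

-- ===== PORT B =====
-- bin(n)[2:] for n ≥ 0: most-significant-bit-first binary digits ('0' alone for n = 0).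
def pvBinStr (m : Nat) : List Char :=
  if h : m = 0 then []
  else pvBinStr (m / 2) ++ [if m % 2 = 1 then '1' else '0']
termination_by m
decreasing_by exact Nat.div_lt_self (Nat.pos_of_ne_zero h) (by omega)

def pvBin (m : Nat) : List Char := if m = 0 then ['0'] else pvBinStr m

-- s[0::2] — every second element starting at index 0 (hand port of the step-2 slice, exact).
def pvStride2 : List Char → List Char
  | [] => []
  | [c] => [c]
  | c :: _ :: rest => c :: pvStride2 rest

def evenOddBit_alt (n : Int) : List Int :=
  -- bin(n)[2:]: for n < 0 Python's bin gives '-0b…', so [2:] is 'b' followed by |n|'s digits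
  let s := (if n < 0 then 'b' :: pvBinStr (-n).toNat else pvBin n.toNat).reverse
  [Int.ofNat ((pvStride2 s).count '1'), Int.ofNat ((pvStride2 (s.drop 1)).count '1')]

-- ===== PRECONDITION & SPEC =====
-- Pre_ excludes negative n, on which A's while loop never terminates (n //= 2 stays -1).
def Pre_evenOddBit (n : Int) : Prop := 0 ≤ n
instance (n : Int) : Decidable (Pre_evenOddBit n) := by unfold Pre_evenOddBit; infer_instance
def pvWitness_evenOddBit : Int := (6)

def Spec_evenOddBit (n : Int) (out : List Int) : Prop := out = evenOddBit_alt n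
instance (n : Int) (out : List Int) : Decidable (Spec_evenOddBit n out) := by unfold Spec_evenOddBit; infer_instance

-- ===== CLAIM (what is proved, stated in full; the proofs are below) =====
def Claim_equal_evenOddBit : Prop := ∀ (n : Int), Dom_evenOddBit n → Pre_evenOddBit n → Spec_evenOddBit n (evenOddBit n)

-- ===== LEMMAS AND PROOFS =====

@[simp] theorem pvStride2_nil : pvStride2 [] = [] := rfl
theorem pvStride2_cons (c : Char) (l : List Char) :
    pvStride2 (c :: l) = c :: pvStride2 (l.drop 1) := by
  cases l <;> rfl

-- reference pair: (count of 1-bits at even positions, at odd positions) of m's LSB-first bits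
def pvEO (m : Nat) : Nat × Nat :=
  if h : m = 0 then (0, 0)
  else
    let p := pvEO (m / 2)
    (m % 2 + p.2, p.1)
termination_by m
decreasing_by exact Nat.div_lt_self (Nat.pos_of_ne_zero h) (by omega)

-- LSB-first bit list of m (empty for 0)
def pvLsb (m : Nat) : List Char :=
  if h : m = 0 then []
  else (if m % 2 = 1 then '1' else '0') :: pvLsb (m / 2)
termination_by m
decreasing_by exact Nat.div_lt_self (Nat.pos_of_ne_zero h) (by omega)

theorem pvBinStr_reverse (m : Nat) : (pvBinStr m).reverse = pvLsb m := by
  induction m using Nat.strong_induction_on with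
  | _ m ih =>
    rw [pvBinStr, pvLsb]
    by_cases h : m = 0
    · simp [h]
    · simp only [h, dite_false]
      rw [List.reverse_append]
      simp [ih (m / 2) (Nat.div_lt_self (Nat.pos_of_ne_zero h) (by omega))]

theorem pvLoopA_eq (m : Nat) : ∀ (index c_eve c_odd : Int),
    pvLoopA m index c_eve c_odd =
      if index % 2 = 0 then [c_eve + (pvEO m).1, c_odd + (pvEO m).2]
      else [c_eve + (pvEO m).2, c_odd + (pvEO m).1] := by
  induction m using Nat.strong_induction_on with
  | _ m ih =>
    intro index c_eve c_odd
    rw [pvLoopA, pvEO]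
    by_cases h : m = 0
    · simp [h]
    · simp only [h, dite_false]
      rw [ih (m / 2) (Nat.div_lt_self (Nat.pos_of_ne_zero h) (by omega))]
      have hm2 : m % 2 = 0 ∨ m % 2 = 1 := by omega
      have hidx : (index + 1) % 2 = 0 ↔ ¬ index % 2 = 0 := by omega
      rcases hm2 with h2 | h2 <;> by_cases hi : index % 2 = 0 <;>
        simp [h2, hi, hidx.mpr, hidx] <;> try ring

theorem pvStride2_counts (m : Nat) :
    ((pvStride2 (pvLsb m)).count '1' = (pvEO m).1) ∧
    ((pvStride2 ((pvLsb m).drop 1)).count '1' = (pvEO m).2) := by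
  induction m using Nat.strong_induction_on with
  | _ m ih =>
    rw [pvLsb, pvEO]
    by_cases h : m = 0
    · simp [h]
    · simp only [h, dite_false]
      have ih2 := ih (m / 2) (Nat.div_lt_self (Nat.pos_of_ne_zero h) (by omega))
      rw [List.drop_one] at ih2
      constructor
      · rw [pvStride2_cons, List.drop_one]
        have hm2 : m % 2 = 0 ∨ m % 2 = 1 := by omega
        rcases hm2 with h2 | h2 <;> simp [h2, ih2.2] <;> omega
      · simpa using ih2.1

theorem evenOddBit_alt_eq (n : Int) (hn : 0 ≤ n) :
    evenOddBit_alt n = [Int.ofNat (pvEO n.toNat).1, Int.ofNat (pvEO n.toNat).2] := by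
  unfold evenOddBit_alt pvBin
  rw [if_neg (by omega : ¬ n < 0)]
  by_cases h : n.toNat = 0
  · simp [h, pvStride2_cons, pvEO]
  · simp only [h, if_false]
    rw [pvBinStr_reverse]
    rw [(pvStride2_counts n.toNat).1, (pvStride2_counts n.toNat).2]

-- ===== VERDICT (by name: the statement is the Claim_ definition above) =====
theorem evenOddBit_spec : Claim_equal_evenOddBit := by
  intro n _ hpre
  unfold Spec_evenOddBit evenOddBit
  rw [pvLoopA_eq, evenOddBit_alt_eq n hpre]
  simp
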